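-- pv_equiv track=rewrite | github.com/SiddheshKanawade/news-agent | prazo/main.py | get_days_filter_for_groups
-- ===== SOURCE A (Python) =====
-- from typing import List, Literal
--
-- def get_days_filter_for_groups(groups: List[str]) -> int:
--     """Determine the number of days to filter news based on group categories."""
--     if any(group.lower() in ["politics"] for group in groups):
--         return 2
--     elif any(group.lower() in ["technology"] for group in groups):
--         return 4
--     elif any(group.lower() in ["science"] for group in groups):
--         return 7
--     elif any(group.lower() in ["health"] for group in groups):
--         return 7
--     else:
--         return 2
-- ===== SOURCE B (Python) =====
-- _DAY_MAP = {"politics": 2, "technology": 4, "science": 7, "health": 7}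
--
-- def get_days_filter_for_groups(groups):
--     """Determine the number of days to filter news based on group categories."""
--     matched = [_DAY_MAP[g.lower()] for g in groups if g.lower() in _DAY_MAP]
--     return min(matched) if matched else 2
-- ===== Notes on version B (the rewrite author's own statement) =====
-- stated objective: simpler
-- what changed: Replaces the four-branch if/elif chain of any-scans (up to 4 passes over the list) with a single keyword->days dict lookup pass collecting matched values and returning their minimum (default 2), which coincides with the priority order since priorities ascend with the day values and the default equals the smallest value.
import Mathlib
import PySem

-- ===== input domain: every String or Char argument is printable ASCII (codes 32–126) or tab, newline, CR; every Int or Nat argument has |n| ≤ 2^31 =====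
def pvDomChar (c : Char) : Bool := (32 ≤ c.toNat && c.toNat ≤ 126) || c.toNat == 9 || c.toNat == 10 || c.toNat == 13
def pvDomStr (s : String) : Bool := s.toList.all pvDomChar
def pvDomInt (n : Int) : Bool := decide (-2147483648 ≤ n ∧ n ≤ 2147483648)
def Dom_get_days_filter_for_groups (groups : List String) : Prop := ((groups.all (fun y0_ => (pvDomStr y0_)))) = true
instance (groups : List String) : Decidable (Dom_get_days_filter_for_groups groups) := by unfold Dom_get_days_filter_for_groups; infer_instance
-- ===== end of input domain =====

-- B replaces A's four-branch if/elif chain of any-scans with one dict-lookup pass and a minimum (objective: simpler).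

-- ===== PORT A =====
def get_days_filter_for_groups (groups : List String) : Int :=
  if groups.any (fun group => ["politics"].contains (PySem.Str.lower group)) then 2
  else if groups.any (fun group => ["technology"].contains (PySem.Str.lower group)) then 4
  else if groups.any (fun group => ["science"].contains (PySem.Str.lower group)) then 7
  else if groups.any (fun group => ["health"].contains (PySem.Str.lower group)) then 7
  else 2

-- ===== PORT B =====
def pvDayMap : PySem.Dict String Int :=
  PySem.Dict.ofList [("politics", 2), ("technology", 4), ("science", 7), ("health", 7)]

def get_days_filter_for_groups_alt (groups : List String) : Int :=
  let matched := groups.filterMap (fun g => pvDayMap.get? (PySem.Str.lower g))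
  match PySem.List.min? matched (fun x => x) with
  | some m => m
  | none => 2

-- ===== PRECONDITION & SPEC =====
def Spec_get_days_filter_for_groups (groups : List String) (out : Int) : Prop := out = get_days_filter_for_groups_alt groups
instance (groups : List String) (out : Int) : Decidable (Spec_get_days_filter_for_groups groups out) := by unfold Spec_get_days_filter_for_groups; infer_instance

-- ===== CLAIM (what is proved, stated in full; the proofs are below) =====
def Claim_equal_get_days_filter_for_groups : Prop := ∀ (groups : List String), Dom_get_days_filter_for_groups groups → Spec_get_days_filter_for_groups groups (get_days_filter_for_groups groups)

-- ===== LEMMAS AND PROOFS =====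

-- the option-valued result A's priority chain computes, as a function of the four membership booleans
def pvOm (groups : List String) : Option Int :=
  if groups.any (fun g => PySem.Str.lower g == "politics") then some 2
  else if groups.any (fun g => PySem.Str.lower g == "technology") then some 4
  else if groups.any (fun g => PySem.Str.lower g == "science") then some 7
  else if groups.any (fun g => PySem.Str.lower g == "health") then some 7
  else none

lemma pvFoldlMinChar (l : List Int) (a : Int) :
    l.foldl min a = match PySem.List.min? l (fun x => x) with | none => a | some m => min a m := by
  induction l generalizing a with
  | nil => simp [PySem.List.min?]
  | cons x t ih =>
    rw [List.foldl_cons, ih, PySem.List.min?_id_cons, ih]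
    cases h : PySem.List.min? t (fun x => x) with
    | none => simp
    | some m => simp [min_assoc]

lemma pvMinChar (groups : List String) :
    PySem.List.min? (groups.filterMap (fun g => pvDayMap.get? (PySem.Str.lower g))) (fun x => x)
      = pvOm groups := by
  induction groups with
  | nil => simp [PySem.List.min?, pvOm]
  | cons g gs ih =>
    by_cases h1 : PySem.Str.lower g = "politics"
    · rw [List.filterMap_cons]
      have hf : pvDayMap.get? (PySem.Str.lower g) = some 2 := by rw [h1]; rfl
      rw [hf, PySem.List.min?_id_cons, pvFoldlMinChar, ih]
      have hp : (PySem.Str.lower g == "politics") = true := by simp [h1]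
      simp only [pvOm, List.any_cons, hp, Bool.true_or, if_true]
      split_ifs <;> norm_num
    · by_cases h2 : PySem.Str.lower g = "technology"
      · rw [List.filterMap_cons]
        have hf : pvDayMap.get? (PySem.Str.lower g) = some 4 := by rw [h2]; rfl
        rw [hf, PySem.List.min?_id_cons, pvFoldlMinChar, ih]
        have hp : (PySem.Str.lower g == "politics") = false := by simp [h1]
        have ht : (PySem.Str.lower g == "technology") = true := by simp [h2]
        simp only [pvOm, List.any_cons, hp, ht, Bool.false_or, Bool.true_or, if_true]
        split_ifs <;> norm_num
      · by_cases h3 : PySem.Str.lower g = "science"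
        · rw [List.filterMap_cons]
          have hf : pvDayMap.get? (PySem.Str.lower g) = some 7 := by rw [h3]; rfl
          rw [hf, PySem.List.min?_id_cons, pvFoldlMinChar, ih]
          have hp : (PySem.Str.lower g == "politics") = false := by simp [h1]
          have ht : (PySem.Str.lower g == "technology") = false := by simp [h2]
          have hs : (PySem.Str.lower g == "science") = true := by simp [h3]
          simp only [pvOm, List.any_cons, hp, ht, hs, Bool.false_or, Bool.true_or, if_true]
          split_ifs <;> norm_num
        · by_cases h4 : PySem.Str.lower g = "health"
          · rw [List.filterMap_cons]
            have hf : pvDayMap.get? (PySem.Str.lower g) = some 7 := by rw [h4]; rfl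
            rw [hf, PySem.List.min?_id_cons, pvFoldlMinChar, ih]
            have hp : (PySem.Str.lower g == "politics") = false := by simp [h1]
            have ht : (PySem.Str.lower g == "technology") = false := by simp [h2]
            have hs : (PySem.Str.lower g == "science") = false := by simp [h3]
            have hh : (PySem.Str.lower g == "health") = true := by simp [h4]
            simp only [pvOm, List.any_cons, hp, ht, hs, hh, Bool.false_or, Bool.true_or, if_true]
            split_ifs <;> norm_num
          · rw [List.filterMap_cons]
            have hf : pvDayMap.get? (PySem.Str.lower g) = none := by
              have e1 : (("politics" : String) == PySem.Str.lower g) = false := beq_eq_false_iff_ne.mpr (Ne.symm h1)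
              have e2 : (("technology" : String) == PySem.Str.lower g) = false := beq_eq_false_iff_ne.mpr (Ne.symm h2)
              have e3 : (("science" : String) == PySem.Str.lower g) = false := beq_eq_false_iff_ne.mpr (Ne.symm h3)
              have e4 : (("health" : String) == PySem.Str.lower g) = false := beq_eq_false_iff_ne.mpr (Ne.symm h4)
              show (PySem.Dict.mk [("politics", (2:Int)), ("technology", 4), ("science", 7), ("health", 7)]).get? (PySem.Str.lower g) = none
              simp [PySem.Dict.get?_mk_cons, e1, e2, e3, e4, PySem.Dict.get?]
            rw [hf, ih]
            have hp : (PySem.Str.lower g == "politics") = false := by simp [h1]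
            have ht : (PySem.Str.lower g == "technology") = false := by simp [h2]
            have hs : (PySem.Str.lower g == "science") = false := by simp [h3]
            have hh : (PySem.Str.lower g == "health") = false := by simp [h4]
            simp only [pvOm, List.any_cons, hp, ht, hs, hh, Bool.false_or]

-- ===== VERDICT (by name: the statement is the Claim_ definition above) =====
theorem get_days_filter_for_groups_spec : Claim_equal_get_days_filter_for_groups := by
  intro groups _
  unfold Spec_get_days_filter_for_groups get_days_filter_for_groups get_days_filter_for_groups_alt
  simp only [pvMinChar]
  unfold pvOm
  simp only [List.contains_cons, List.contains_nil, Bool.or_false, eq_comm]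
  split_ifs <;> rfl
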